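-- pv_equiv track=rewrite | github.com/happymman/AL | 프로그래머스/1/92334. 신고 결과 받기/신고 결과 받기.py | solution
-- ===== SOURCE A (Python) =====
-- def solution(id_list, reports, k):
--     result = []
--
--     reported_dict = {}
--     reporter_dict = {}
--     for id in id_list :
--         reporter_dict[id] = set()
--
--     #신고
--     for report in reports : #report 선택
--         reporter, reported = report.split() #reporter : 신고자, reported : 피신고자
--
--         if reported not in reporter_dict[reporter] : #신고자 신고목록에 없으면
--             reporter_dict[reporter].add(reported) #신고자 신고목록에 추가
--             reported_dict[reported] = reported_dict.get(reported, 0)+1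
--
--     stop = set()
--     for key, value in reported_dict.items() :
--         if value >= k : stop.add(key) #정지목록 = 신고횟수 넘는 사람 추가
--
--     #정지 목록에 있는 사람이 몇명있는지 체크
--     for id in id_list : #신고자 선택
--         sum=0
--         for reported in reporter_dict[id] : #피신고자 선택
--             if reported in stop : sum +=1
--         result.append(sum)
--
--     return result
-- ===== SOURCE B (Python) =====
-- def solution(id_list, reports, k):
--     # Dedup the reports once into an ordered list of (reporter, reported) pairs,
--     # count reports per target, then answer each id by a scan over the pair list.
--     pairs = []
--     seen = set()
--     for rep in reports:
--         a, b = rep.split()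
--         if (a, b) not in seen:
--             seen.add((a, b))
--             pairs.append((a, b))
--     counts = {}
--     for a, b in pairs:
--         counts[b] = counts.get(b, 0) + 1
--     banned = {b for b, c in counts.items() if c >= k}
--     return [sum(1 for a, b in pairs if a == i and b in banned) for i in id_list]
-- ===== Notes on version B (the rewrite author's own statement) =====
-- stated objective: alternative
-- what changed: A maintains a per-reporter dict of sets and answers each id by iterating its set against the stop set; B instead dedups the reports once into an ordered pair list, counts per target from that list, and answers each id by a single scan over the pair list.
import Mathlib
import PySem

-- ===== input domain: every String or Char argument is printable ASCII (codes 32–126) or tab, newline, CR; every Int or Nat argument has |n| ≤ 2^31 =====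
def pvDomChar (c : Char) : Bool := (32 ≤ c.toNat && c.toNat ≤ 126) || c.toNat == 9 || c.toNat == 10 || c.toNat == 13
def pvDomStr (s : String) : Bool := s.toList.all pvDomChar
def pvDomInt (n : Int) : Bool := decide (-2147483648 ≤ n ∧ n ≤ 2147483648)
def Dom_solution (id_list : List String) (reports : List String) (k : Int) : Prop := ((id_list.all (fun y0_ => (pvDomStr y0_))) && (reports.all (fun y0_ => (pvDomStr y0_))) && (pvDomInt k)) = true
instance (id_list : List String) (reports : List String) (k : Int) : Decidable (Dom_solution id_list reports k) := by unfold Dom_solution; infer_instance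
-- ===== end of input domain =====

-- B replaces A's per-reporter dict-of-sets with one dedup'd (reporter, reported) pair list
-- scanned per id: an alternative decomposition of the same cost.


-- ===== PORT A =====
def solution (id_list : List String) (reports : List String) (k : Int) : List Int :=
  -- reporter_dict[id] = set() for id in id_list
  let rd0 : PySem.Dict String (PySem.Set String) :=
    id_list.foldl (fun d id => d.insert id PySem.Set.empty) PySem.Dict.empty
  -- single loop over reports maintaining (reporter_dict, reported_dict)
  let st := reports.foldl
    (fun (st : PySem.Dict String (PySem.Set String) × PySem.Dict String Int) report =>
      let ws := PySem.Str.split₀ report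
      let reporter := ws.getD 0 ""   -- 'reporter, reported = report.split()'; Pre_ excludes ≠ 2 tokens (ValueError)
      let reported := ws.getD 1 ""
      let s := st.1.getD reporter PySem.Set.empty  -- reporter_dict[reporter]; Pre_ excludes missing key (KeyError)
      if PySem.Set.contains s reported then st
      else (st.1.insert reporter (PySem.Set.add s reported),
            st.2.insert reported (st.2.getD reported 0 + 1)))
    (rd0, PySem.Dict.empty)
  -- stop = {key for key, value in reported_dict.items() if value >= k}
  let stop : PySem.Set String :=
    st.2.items.foldl (fun stp kv => if kv.2 ≥ k then PySem.Set.add stp kv.1 else stp) PySem.Set.empty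
  -- per id: iterate its reported set, counting members of stop (a count: set order irrelevant)
  id_list.map (fun id =>
    (st.1.getD id PySem.Set.empty).foldl
      (fun sum reported => if PySem.Set.contains stop reported then sum + 1 else sum) (0 : Int))

-- ===== PORT B =====
def solution_alt (id_list : List String) (reports : List String) (k : Int) : List Int :=
  -- pairs: ordered dedup of the (reporter, reported) pairs, via the 'seen' set
  let st := reports.foldl
    (fun (st : List (String × String) × PySem.Set (String × String)) rep =>
      let ws := PySem.Str.split₀ rep
      let p := (ws.getD 0 "", ws.getD 1 "")
      if PySem.Set.contains st.2 p then st else (st.1 ++ [p], PySem.Set.add st.2 p))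
    ([], PySem.Set.empty)
  let pairs := st.1
  -- counts[b] = counts.get(b, 0) + 1 for (a, b) in pairs
  let counts : PySem.Dict String Int :=
    pairs.foldl (fun d p => d.insert p.2 (d.getD p.2 0 + 1)) PySem.Dict.empty
  -- banned = {b for b, c in counts.items() if c >= k}
  let banned : PySem.Set String :=
    counts.items.foldl (fun s kv => if kv.2 ≥ k then PySem.Set.add s kv.1 else s) PySem.Set.empty
  -- [sum(1 for a, b in pairs if a == i and b in banned) for i in id_list]
  id_list.map (fun i =>
    (pairs.map (fun p => if p.1 == i && PySem.Set.contains banned p.2 then (1 : Int) else 0)).sum)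

-- ===== PRECONDITION & SPEC =====
-- Pre_ excludes exactly the inputs on which Python A raises: a report that does not split
-- into exactly two tokens (ValueError) or whose reporter is absent from id_list (KeyError).
def Pre_solution (id_list : List String) (reports : List String) (k : Int) : Prop :=
  (reports.all (fun r =>
    (PySem.Str.split₀ r).length == 2 && id_list.contains ((PySem.Str.split₀ r).getD 0 ""))) = true
instance (id_list : List String) (reports : List String) (k : Int) : Decidable (Pre_solution id_list reports k) := by unfold Pre_solution; infer_instance
def pvWitness_solution : List String × List String × Int := (["muzi", "frodo"], ["muzi frodo", "frodo muzi", "muzi frodo"], 1)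

def Spec_solution (id_list : List String) (reports : List String) (k : Int) (out : List Int) : Prop := out = solution_alt id_list reports k
instance (id_list : List String) (reports : List String) (k : Int) (out : List Int) : Decidable (Spec_solution id_list reports k out) := by unfold Spec_solution; infer_instance

-- ===== CLAIM (what is proved, stated in full; the proofs are below) =====
def Claim_equal_solution : Prop := ∀ (id_list : List String) (reports : List String) (k : Int), Dom_solution id_list reports k → Pre_solution id_list reports k → Spec_solution id_list reports k (solution id_list reports k)

-- ===== LEMMAS AND PROOFS =====

-- B's 'seen' set always equals the pair list itself (pairs are appended in dedup order).
lemma b_seen_eq (reports : List String)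
    (P : List (String × String)) :
    reports.foldl
      (fun (st : List (String × String) × PySem.Set (String × String)) rep =>
        let ws := PySem.Str.split₀ rep
        let p := (ws.getD 0 "", ws.getD 1 "")
        if PySem.Set.contains st.2 p then st else (st.1 ++ [p], PySem.Set.add st.2 p))
      (P, P) = (fun P => (P, P))
      (reports.foldl
        (fun (P : List (String × String)) rep =>
          let ws := PySem.Str.split₀ rep
          let p := (ws.getD 0 "", ws.getD 1 "")
          if PySem.Set.contains P p then P else P ++ [p]) P) := by
  induction reports generalizing P with
  | nil => rfl
  | cons r rs ih =>
    simp only [List.foldl_cons]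
    by_cases h : PySem.Set.contains P (( PySem.Str.split₀ r).getD 0 "", (PySem.Str.split₀ r).getD 1 "") = true
    · simp only [h, if_true]; exact ih P
    · simp only [eq_false_of_ne_true h, PySem.Set.add]
      exact ih _

-- membership in map-snd-of-filter is membership of the pair
lemma mem_snd_filter (P : List (String × String)) (a b : String) :
    (b ∈ (P.filter (fun p => p.1 == a)).map Prod.snd) ↔ (a, b) ∈ P := by
  constructor
  · intro h
    rcases List.mem_map.mp h with ⟨p, hp, hsnd⟩
    rcases List.mem_filter.mp hp with ⟨hmem, hfst⟩
    have : p = (a, b) := by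
      cases p; simp_all [beq_iff_eq]
    exact this ▸ hmem
  · intro h
    exact List.mem_map.mpr ⟨(a, b), List.mem_filter.mpr ⟨h, by simp⟩, rfl⟩

-- counting fold over a list equals accumulator + countP
lemma foldl_count (c : String → Bool) (l : List String) (n : Int) :
    l.foldl (fun sum x => if c x then sum + 1 else sum) n = n + (l.countP c : Int) := by
  induction l generalizing n with
  | nil => simp
  | cons x xs ih =>
    simp only [List.foldl_cons, List.countP_cons]
    by_cases h : c x = true
    · simp [h, ih]; ring
    · simp [h, ih]

-- the 0/1 Int sum is countP
lemma sum_ite (P : List (String × String)) (c : String × String → Bool) :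
    (P.map (fun p => if c p then (1 : Int) else 0)).sum = (P.countP c : Int) := by
  induction P with
  | nil => simp
  | cons p ps ih =>
    simp only [List.map_cons, List.sum_cons, List.countP_cons]
    by_cases h : c p = true
    · simp [h, ih]; ring
    · simp [h, ih]

-- The main loop invariant: A's (reporter_dict, reported_dict) state is determined by B's
-- dedup'd pair list P, provided every key's set already lists the snds of P filtered by fst.
lemma loop_inv (reports : List String)
    (rd : PySem.Dict String (PySem.Set String)) (cd : PySem.Dict String Int)
    (P : List (String × String))
    (h1 : ∀ key, rd.getD key PySem.Set.empty = (P.filter (fun p => p.1 == key)).map Prod.snd)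
    (h2 : cd = P.foldl (fun d p => d.insert p.2 (d.getD p.2 0 + 1)) PySem.Dict.empty) :
    (let st := reports.foldl
        (fun (st : PySem.Dict String (PySem.Set String) × PySem.Dict String Int) report =>
          let ws := PySem.Str.split₀ report
          let reporter := ws.getD 0 ""
          let reported := ws.getD 1 ""
          let s := st.1.getD reporter PySem.Set.empty
          if PySem.Set.contains s reported then st
          else (st.1.insert reporter (PySem.Set.add s reported),
                st.2.insert reported (st.2.getD reported 0 + 1)))
        (rd, cd)
     let P' := reports.foldl
        (fun (P : List (String × String)) rep =>
          let ws := PySem.Str.split₀ rep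
          let p := (ws.getD 0 "", ws.getD 1 "")
          if PySem.Set.contains P p then P else P ++ [p]) P
     (∀ key, st.1.getD key PySem.Set.empty = (P'.filter (fun p => p.1 == key)).map Prod.snd) ∧
       st.2 = P'.foldl (fun d p => d.insert p.2 (d.getD p.2 0 + 1)) PySem.Dict.empty) := by
  induction reports generalizing rd cd P with
  | nil => exact ⟨h1, h2⟩
  | cons r rs ih =>
    simp only [List.foldl_cons]
    set a := (PySem.Str.split₀ r).getD 0 "" with ha
    set b := (PySem.Str.split₀ r).getD 1 "" with hb
    -- the two membership tests agree
    have hmem : PySem.Set.contains (rd.getD a PySem.Set.empty) b = PySem.Set.contains P (a, b) := by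
      simp only [PySem.Set.contains, h1 a]
      by_cases h : (a, b) ∈ P
      · simp [(mem_snd_filter P a b).mpr h, h]
      · simp [mem_snd_filter, h]
    by_cases hc : PySem.Set.contains P (a, b) = true
    · rw [if_pos (by rw [hmem]; exact hc), if_pos hc]
      exact ih rd cd P h1 h2
    · rw [if_neg (by rw [hmem]; exact hc), if_neg hc]
      apply ih
      · intro key
        rw [PySem.Dict.getD_insert]
        by_cases hk : key = a
        · subst hk
          have hnb : (b ∈ (P.filter (fun p => p.1 == a)).map Prod.snd) = False := by
            simp only [eq_iff_iff, iff_false]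
            intro hx
            exact hc (by simpa [PySem.Set.contains, List.contains_iff_mem]
              using (mem_snd_filter P a b).mp hx)
          simp only [PySem.Set.add, PySem.Set.contains, h1 a]
          rw [List.filter_append, List.map_append]
          simp [hnb]
        · rw [if_neg hk, h1 key, List.filter_append, List.map_append]
          have : ((a, b).1 == key) = false := by
            simp; exact fun h => hk h.symm
          simp [this]
      · rw [h2, List.foldl_append]
        rfl

-- the initial reporter_dict maps every key to the empty set
lemma rd0_getD (id_list : List String) (key : String) :
    (id_list.foldl (fun d id => d.insert id (PySem.Set.empty : PySem.Set String)) PySem.Dict.empty).getD key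
      PySem.Set.empty = PySem.Set.empty := by
  induction id_list using List.reverseRecOn with
  | nil => rfl
  | append_singleton xs x ihx =>
    rw [List.foldl_append, List.foldl_cons, List.foldl_nil, PySem.Dict.getD_insert]
    split_ifs with h
    · rfl
    · exact ihx

-- agreement of the two per-id counts over the same pair list and stop set
lemma per_id_count (P : List (String × String)) (stop : PySem.Set String) (id : String) :
    ((P.filter (fun p => p.1 == id)).map Prod.snd).foldl
        (fun sum reported => if PySem.Set.contains stop reported then sum + 1 else sum) (0 : Int)
      = (P.map (fun p => if p.1 == id && PySem.Set.contains stop p.2 then (1 : Int) else 0)).sum := by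
  rw [foldl_count, sum_ite, List.countP_map, List.countP_filter]
  simp [Function.comp, Bool.and_comm]

-- ===== VERDICT (by name: the statement is the Claim_ definition above) =====
theorem solution_spec : Claim_equal_solution := by
  intro id_list reports k _hdom _hpre
  unfold Spec_solution solution solution_alt
  dsimp only
  have hseen := b_seen_eq reports []
  have hinv := loop_inv reports _ PySem.Dict.empty [] (fun key => rd0_getD id_list key) rfl
  simp only at hinv hseen
  simp only [PySem.Set.empty] at *
  obtain ⟨h1, h2⟩ := hinv
  simp only [hseen]
  simp only [h2]
  apply List.map_congr_left
  intro id _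
  rw [h1 id]
  exact per_id_count _ _ id
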